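-- pv_equiv track=rewrite | github.com/wlsgh7608/TIL | algorithm/implementation/baekjoon/14500.py | three_by_two
-- ===== SOURCE A (Python) =====
-- def three_by_two(G,i,j):
--     max_n = 0
--     sum = 0
--     for x in range(i,i+3):
--         for y in range(j,j+2):
--             sum += G[x][y]
--     max_n = max(max_n,sum-G[i][j]-G[i+1][j],sum-G[i+1][j]-G[i+2][j],sum-G[i][j+1]-G[i+1][j+1],sum-G[i+1][j+1]-G[i+2][j+1])
--     max_n = max(max_n,sum-G[i][j]-G[i+2][j+1],sum-G[i+2][j]-G[i][j+1])
--     max_n = max(max_n,sum-G[i][j]-G[i+2][j],sum-G[i][j+1]-G[i+2][j+1])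
--     return max_n
-- ===== SOURCE B (Python) =====
-- # Eight tetromino shapes that fit a 3x2 window, as (dx, dy) offsets from (i, j).
-- # Each is the complement of one of A's subtracted pairs in the full 6-cell block.
-- SHAPES = [
--     [(0, 1), (1, 1), (2, 0), (2, 1)],
--     [(0, 0), (0, 1), (1, 1), (2, 1)],
--     [(0, 0), (1, 0), (2, 0), (2, 1)],
--     [(0, 0), (0, 1), (1, 0), (2, 0)],
--     [(0, 1), (1, 0), (1, 1), (2, 0)],
--     [(0, 0), (1, 0), (1, 1), (2, 1)],
--     [(0, 1), (1, 0), (1, 1), (2, 1)],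
--     [(0, 0), (1, 0), (1, 1), (2, 0)],
-- ]
--
-- def three_by_two(G, i, j):
--     best = 0
--     for shape in SHAPES:
--         s = 0
--         for dx, dy in shape:
--             s += G[i + dx][j + dy]
--         best = max(best, s)
--     return best
-- ===== Notes on version B (the rewrite author's own statement) =====
-- stated objective: simpler
-- what changed: B enumerates the eight tetromino shapes as explicit (dx,dy) offset lists and folds a running maximum of direct 4-cell sums, instead of A's 3x2 window total with per-shape subtraction of the two complementary cells across three chained max calls.
import Mathlib
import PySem

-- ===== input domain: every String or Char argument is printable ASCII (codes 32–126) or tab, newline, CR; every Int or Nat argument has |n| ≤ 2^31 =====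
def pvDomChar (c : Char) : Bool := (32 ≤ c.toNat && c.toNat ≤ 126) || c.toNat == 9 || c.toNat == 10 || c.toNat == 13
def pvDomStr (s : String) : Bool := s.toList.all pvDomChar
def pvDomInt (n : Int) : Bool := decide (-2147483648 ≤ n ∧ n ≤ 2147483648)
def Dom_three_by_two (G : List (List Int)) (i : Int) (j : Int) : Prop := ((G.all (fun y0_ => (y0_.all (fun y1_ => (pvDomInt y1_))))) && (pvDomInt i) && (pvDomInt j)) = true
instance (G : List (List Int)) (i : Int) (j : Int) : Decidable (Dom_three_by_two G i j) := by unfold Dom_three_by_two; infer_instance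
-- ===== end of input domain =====

-- B replaces A's 6-cell-total-minus-complement-pair computation by a fold over eight explicit
-- shape offset lists summing four cells directly (objective: simpler). Equal wherever A returns.

-- shared indexing primitive: G[x][y] with Python index semantics (exact under Pre_, which
-- guarantees every access is in range)
def pvCell (G : List (List Int)) (x y : Int) : Int :=
  PySem.List.pyGetD (PySem.List.pyGetD G x []) y 0

-- ===== PORT A =====
def three_by_two (G : List (List Int)) (i : Int) (j : Int) : Int :=
  let max_n : Int := 0
  let sum : Int := (PySem.List.pyRange i (i+3) 1).foldl (fun s x =>
      (PySem.List.pyRange j (j+2) 1).foldl (fun s y => s + pvCell G x y) s) 0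
  let max_n := max (max (max (max max_n
      (sum - pvCell G i j - pvCell G (i+1) j))
      (sum - pvCell G (i+1) j - pvCell G (i+2) j))
      (sum - pvCell G i (j+1) - pvCell G (i+1) (j+1)))
      (sum - pvCell G (i+1) (j+1) - pvCell G (i+2) (j+1))
  let max_n := max (max max_n
      (sum - pvCell G i j - pvCell G (i+2) (j+1)))
      (sum - pvCell G (i+2) j - pvCell G i (j+1))
  let max_n := max (max max_n
      (sum - pvCell G i j - pvCell G (i+2) j))
      (sum - pvCell G i (j+1) - pvCell G (i+2) (j+1))
  max_n

-- ===== PORT B =====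
def pvShapes : List (List (Int × Int)) :=
  [ [(0, 1), (1, 1), (2, 0), (2, 1)],
    [(0, 0), (0, 1), (1, 1), (2, 1)],
    [(0, 0), (1, 0), (2, 0), (2, 1)],
    [(0, 0), (0, 1), (1, 0), (2, 0)],
    [(0, 1), (1, 0), (1, 1), (2, 0)],
    [(0, 0), (1, 0), (1, 1), (2, 1)],
    [(0, 1), (1, 0), (1, 1), (2, 1)],
    [(0, 0), (1, 0), (1, 1), (2, 0)] ]

def three_by_two_alt (G : List (List Int)) (i : Int) (j : Int) : Int :=
  pvShapes.foldl (fun best shape =>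
    max best (shape.foldl (fun s d => s + pvCell G (i + d.1) (j + d.2)) 0)) 0

-- ===== PRECONDITION & SPEC =====
-- Pre_ excludes exactly the inputs where the Python raises IndexError: some of the six
-- accessed cells G[x][y], x in {i,i+1,i+2}, y in {j,j+1}, is out of range (Python index
-- semantics, negative indices count from the end).
def Pre_three_by_two (G : List (List Int)) (i : Int) (j : Int) : Prop :=
  PySem.Raise.InRange G.length i ∧ PySem.Raise.InRange G.length (i+1) ∧
  PySem.Raise.InRange G.length (i+2) ∧
  PySem.Raise.InRange (PySem.List.pyGetD G i []).length j ∧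
  PySem.Raise.InRange (PySem.List.pyGetD G i []).length (j+1) ∧
  PySem.Raise.InRange (PySem.List.pyGetD G (i+1) []).length j ∧
  PySem.Raise.InRange (PySem.List.pyGetD G (i+1) []).length (j+1) ∧
  PySem.Raise.InRange (PySem.List.pyGetD G (i+2) []).length j ∧
  PySem.Raise.InRange (PySem.List.pyGetD G (i+2) []).length (j+1)
instance (G : List (List Int)) (i : Int) (j : Int) : Decidable (Pre_three_by_two G i j) := by
  unfold Pre_three_by_two; infer_instance

def pvWitness_three_by_two : List (List Int) × Int × Int := ([[1, 2], [3, 4], [5, 6]], 0, 0)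

def Spec_three_by_two (G : List (List Int)) (i : Int) (j : Int) (out : Int) : Prop := out = three_by_two_alt G i j
instance (G : List (List Int)) (i : Int) (j : Int) (out : Int) : Decidable (Spec_three_by_two G i j out) := by unfold Spec_three_by_two; infer_instance

-- ===== CLAIM (what is proved, stated in full; the proofs are below) =====
def Claim_equal_three_by_two : Prop := ∀ (G : List (List Int)) (i : Int) (j : Int), Dom_three_by_two G i j → Pre_three_by_two G i j → Spec_three_by_two G i j (three_by_two G i j)

-- ===== LEMMAS AND PROOFS =====
theorem pvRange3 (i : Int) : PySem.List.pyRange i (i+3) 1 = [i, i+1, i+2] := by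
  rw [PySem.List.pyRange_one_cons (by omega), PySem.List.pyRange_one_cons (by omega),
      PySem.List.pyRange_one_cons (by omega), PySem.List.pyRange_one_eq_nil (by omega)]
  norm_num
  omega

theorem pvRange2 (j : Int) : PySem.List.pyRange j (j+2) 1 = [j, j+1] := by
  rw [PySem.List.pyRange_one_cons (by omega), PySem.List.pyRange_one_cons (by omega),
      PySem.List.pyRange_one_eq_nil (by omega)]

-- ===== VERDICT (by name: the statement is the Claim_ definition above) =====
set_option maxHeartbeats 1000000 in
theorem three_by_two_spec : Claim_equal_three_by_two := by
  intro G i j _ _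
  unfold Spec_three_by_two three_by_two three_by_two_alt pvShapes
  rw [pvRange3, pvRange2]
  simp only [List.foldl, add_zero]
  generalize pvCell G i j = a
  generalize pvCell G i (j+1) = b
  generalize pvCell G (i+1) j = c
  generalize pvCell G (i+1) (j+1) = d
  generalize pvCell G (i+2) j = e
  generalize pvCell G (i+2) (j+1) = f
  ring_nf
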